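-- pv_equiv track=rewrite | github.com/alirezamshi-zz/G2GTr | senttr/parser/cmds/predict.py | rearange
-- ===== SOURCE A (Python) =====
-- def rearange(items, ids):
--
--     indicies = []
--     for id in ids:
--         for i in id:
--             indicies.append(i)
--     indicies = sorted(range(len(indicies)), key=lambda k: indicies[k])
--     items = [items[i] for i in indicies]
--     return items
-- ===== SOURCE B (Python) =====
-- def rearange(items, ids):
--     buckets = {}
--     for k, v in enumerate([i for id in ids for i in id]):
--         buckets.setdefault(v, []).append(items[k])
--     out = []
--     for v in sorted(buckets):
--         out.extend(buckets[v])
--     return out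
-- ===== Notes on version B (the rewrite author's own statement) =====
-- stated objective: faster
-- what changed: Instead of argsorting an index permutation of the flattened ids and indexing items through it, B groups items into a dict of buckets keyed by their flattened id (insertion order inside a bucket gives stability), sorts only the distinct keys, and concatenates the buckets in key order.
import Mathlib
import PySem

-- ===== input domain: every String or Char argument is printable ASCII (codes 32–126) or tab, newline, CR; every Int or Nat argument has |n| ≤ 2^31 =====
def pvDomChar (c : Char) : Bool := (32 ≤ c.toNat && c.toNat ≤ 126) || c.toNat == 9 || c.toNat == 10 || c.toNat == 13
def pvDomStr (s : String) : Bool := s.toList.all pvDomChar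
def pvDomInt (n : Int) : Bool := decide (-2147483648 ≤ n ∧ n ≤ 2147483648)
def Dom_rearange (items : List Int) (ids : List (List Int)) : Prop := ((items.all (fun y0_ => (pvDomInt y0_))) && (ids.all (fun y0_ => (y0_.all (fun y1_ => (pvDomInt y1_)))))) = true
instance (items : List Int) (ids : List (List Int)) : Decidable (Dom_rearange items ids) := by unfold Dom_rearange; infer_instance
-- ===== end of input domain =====

-- B replaces A's argsort-and-reindex with dict bucketing: items are grouped into per-id
-- buckets in one pass, only the distinct ids are sorted, and the buckets are concatenated.

-- ===== PORT A =====
def rearange (items : List Int) (ids : List (List Int)) : List Int :=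
  let indicies := ids.foldl (fun acc id => id.foldl (fun acc2 i => acc2 ++ [i]) acc) []
  let sortedIdx := PySem.List.sorted (PySem.List.pyRange 0 (indicies.length : Int) 1)
      (fun k => PySem.List.pyGetD indicies k 0) false
  sortedIdx.map (fun i => PySem.List.pyGetD items i 0)

-- ===== PORT B =====
def rearange_alt (items : List Int) (ids : List (List Int)) : List Int :=
  let flat := ids.flatMap (fun id => id)
  let buckets := (PySem.List.enumerate flat 0).foldl
      (fun d kv => d.modify kv.2 [] (fun b => b ++ [PySem.List.pyGetD items kv.1 0]))
      PySem.Dict.empty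
  (PySem.List.sorted buckets.keys (fun v => v) false).foldl
      (fun out v => out ++ buckets.getD v []) []

-- ===== PRECONDITION & SPEC =====
-- Pre_ excludes exactly the inputs where Python A raises IndexError: when the flattened ids
-- are longer than items, items[i] is evaluated at an out-of-range index.
def Pre_rearange (items : List Int) (ids : List (List Int)) : Prop :=
  (ids.flatMap (fun id => id)).length ≤ items.length
instance (items : List Int) (ids : List (List Int)) : Decidable (Pre_rearange items ids) := by
  unfold Pre_rearange; infer_instance

def pvWitness_rearange : List Int × List (List Int) := ([10, 20, 30], [[2, 0], [1]])

def Spec_rearange (items : List Int) (ids : List (List Int)) (out : List Int) : Prop := out = rearange_alt items ids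
instance (items : List Int) (ids : List (List Int)) (out : List Int) : Decidable (Spec_rearange items ids out) := by unfold Spec_rearange; infer_instance

-- ===== CLAIM (what is proved, stated in full; the proofs are below) =====
def Claim_equal_rearange : Prop := ∀ (items : List Int) (ids : List (List Int)), Dom_rearange items ids → Pre_rearange items ids → Spec_rearange items ids (rearange items ids)

-- ===== LEMMAS AND PROOFS =====

-- A's nested append loop builds the flattened ids.
theorem flatten_loop_eq (ids : List (List Int)) (acc : List Int) :
    ids.foldl (fun acc id => id.foldl (fun acc2 i => acc2 ++ [i]) acc) acc
      = acc ++ ids.flatMap (fun id => id) := by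
  induction ids generalizing acc with
  | nil => simp
  | cons hd tl ih =>
      rw [List.foldl_cons, ih, PySem.List.foldl_append_singleton]
      simp

-- Mapping commutes with insertBy when the comparison factors through the map.
theorem insertBy_map {α β : Type} (f : α → β) (before : β → β → Bool) (x : α) (ys : List α) :
    (PySem.List.insertBy (fun a b => before (f a) (f b)) x ys).map f
      = PySem.List.insertBy before (f x) (ys.map f) := by
  induction ys with
  | nil => simp [PySem.List.insertBy]
  | cons y ys ih =>
      simp only [PySem.List.insertBy, List.map_cons]
      by_cases h : before (f x) (f y) <;> simp [h, ih]

-- Mapping commutes with the stable sort when the key factors through the map.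
theorem sorted_map_comm {α β κ : Type} [LT κ] [DecidableLT κ]
    (f : α → β) (key : β → κ) (xs : List α) :
    (PySem.List.sorted xs (fun x => key (f x)) false).map f
      = PySem.List.sorted (xs.map f) key false := by
  rw [PySem.List.sorted_eq_foldl_insertBy, PySem.List.sorted_eq_foldl_insertBy]
  suffices h : ∀ acc : List α,
      (xs.foldl (fun acc x => PySem.List.insertBy (fun a b => decide (key (f a) < key (f b))) x acc) acc).map f
        = (xs.map f).foldl (fun acc x => PySem.List.insertBy (fun a b => decide (key a < key b)) x acc) (acc.map f) by
    simpa using h []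
  induction xs with
  | nil => intro acc; simp
  | cons x xs ih =>
      intro acc
      simp only [List.foldl_cons, List.map_cons, ih,
        insertBy_map f (fun a b => decide (key a < key b)) x acc]

-- insertBy passes over a prefix it must not go before.
theorem insertBy_append_not {α : Type} (before : α → α → Bool) (x : α) (B L : List α)
    (h : ∀ b ∈ B, before x b = false) :
    PySem.List.insertBy before x (B ++ L) = B ++ PySem.List.insertBy before x L := by
  induction B with
  | nil => simp
  | cons b B ih =>
      have hb : before x b = false := h b (by simp)
      simp only [List.cons_append, PySem.List.insertBy, hb, Bool.false_eq_true, if_false]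
      rw [ih (fun c hc => h c (by simp [hc]))]

-- insertBy goes to the front when it beats everything.
theorem insertBy_all_before {α : Type} (before : α → α → Bool) (x : α) (L : List α)
    (h : ∀ b ∈ L, before x b = true) :
    PySem.List.insertBy before x L = x :: L := by
  cases L with
  | nil => rfl
  | cons c t => simp [PySem.List.insertBy, h c (by simp)]

-- Inserting a pair into the bucket concatenation appends it to its own bucket.
theorem insertBy_flatMap (x : Int × Int) (zs : List (Int × Int)) (ks : List Int)
    (hs : ks.Pairwise (· < ·)) (hm : x.1 ∈ ks) :
    PySem.List.insertBy (fun a b => decide (a.1 < b.1)) x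
        (ks.flatMap (fun v => zs.filter (fun p => p.1 == v)))
      = ks.flatMap (fun v => (zs ++ [x]).filter (fun p => p.1 == v)) := by
  induction ks with
  | nil => simp at hm
  | cons k ks ih =>
      rw [List.pairwise_cons] at hs
      obtain ⟨hk, hs'⟩ := hs
      have hkeyB : ∀ b ∈ zs.filter (fun p => p.1 == k), b.1 = k := by
        intro b hb
        have := (List.mem_filter.1 hb).2
        exact beq_iff_eq.1 this
      by_cases hx : x.1 = k
      · -- x belongs to the first bucket
        have hrest : ∀ b ∈ ks.flatMap (fun v => zs.filter (fun p => p.1 == v)),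
            decide (x.1 < b.1) = true := by
          intro b hb
          obtain ⟨v, hv, hbv⟩ := List.mem_flatMap.1 hb
          have : b.1 = v := beq_iff_eq.1 (List.mem_filter.1 hbv).2
          simp [this, hx]
          exact hk v hv
        rw [List.flatMap_cons, insertBy_append_not _ _ _ _
              (fun b hb => by simp [hkeyB b hb, hx]),
            insertBy_all_before _ _ _ hrest]
        rw [List.flatMap_cons]
        have h1 : (zs ++ [x]).filter (fun p => p.1 == k)
            = zs.filter (fun p => p.1 == k) ++ [x] := by
          simp [List.filter_append, hx]
        have h2 : ks.flatMap (fun v => (zs ++ [x]).filter (fun p => p.1 == v))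
            = ks.flatMap (fun v => zs.filter (fun p => p.1 == v)) := by
          refine List.flatMap_congr ?_
          intro v hv
          have : (x.1 == v) = false := by
            have := hk v hv; simp [hx]; omega
          simp [List.filter_append, this]
        rw [h1, h2]
        simp
      · -- x belongs to a later bucket
        have hmem : x.1 ∈ ks := by
          cases List.mem_cons.1 hm with
          | inl h => exact absurd h hx
          | inr h => exact h
        rw [List.flatMap_cons, insertBy_append_not _ _ _ _
              (fun b hb => by
                have hb1 := hkeyB b hb
                have : k < x.1 := hk _ hmem
                simp [hb1]; omega),
            ih hs' hmem]
        rw [List.flatMap_cons]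
        have h1 : (zs ++ [x]).filter (fun p => p.1 == k)
            = zs.filter (fun p => p.1 == k) := by
          have : (x.1 == k) = false := by simp [hx]
          simp [List.filter_append, this]
        rw [h1]

-- The stable sort by key is the concatenation of the per-key buckets, for any strictly
-- increasing key list covering all keys.
theorem sorted_eq_flatMap (zs : List (Int × Int)) (ks : List Int)
    (hs : ks.Pairwise (· < ·)) (hm : ∀ p ∈ zs, p.1 ∈ ks) :
    PySem.List.sorted zs (fun p => p.1) false
      = ks.flatMap (fun v => zs.filter (fun p => p.1 == v)) := by
  rw [PySem.List.sorted_eq_foldl_insertBy]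
  induction zs using List.reverseRecOn with
  | nil => simp
  | append_singleton zs x ih =>
      rw [List.foldl_append, List.foldl_cons, List.foldl_nil,
          ih (fun p hp => hm p (by simp [hp])),
          insertBy_flatMap x zs ks hs (hm x (by simp))]

-- ===== VERDICT (by name: the statement is the Claim_ definition above) =====
theorem rearange_spec : Claim_equal_rearange := by
  intro items ids _ _
  unfold Spec_rearange rearange rearange_alt
  simp only [flatten_loop_eq ids [], List.nil_append]
  set flat := ids.flatMap (fun id => id) with hflat
  set f : Int → Int × Int := fun k => (PySem.List.pyGetD flat k 0, PySem.List.pyGetD items k 0) with hf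
  set pairs : List (Int × Int) := (PySem.List.enumerate flat 0).map
      (fun kv => (kv.2, PySem.List.pyGetD items kv.1 0)) with hpairs
  have hpr : (PySem.List.pyRange 0 (flat.length : Int) 1).map f = pairs := by
    rw [hpairs, PySem.List.enumerate_eq_map_pyRange flat 0, List.map_map]
    rfl
  -- A's side: argsort then index = map snd of the sorted pairs
  have hA : (PySem.List.sorted (PySem.List.pyRange 0 (flat.length : Int) 1)
        (fun k => PySem.List.pyGetD flat k 0) false).map (fun i => PySem.List.pyGetD items i 0)
      = (PySem.List.sorted pairs (fun p => p.1) false).map (fun p => p.2) := by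
    have h1 : (PySem.List.sorted (PySem.List.pyRange 0 (flat.length : Int) 1)
          (fun k => (f k).1) false).map f
        = PySem.List.sorted pairs (fun p => p.1) false := by
      rw [sorted_map_comm f (fun p => p.1), hpr]
    calc (PySem.List.sorted (PySem.List.pyRange 0 (flat.length : Int) 1)
            (fun k => PySem.List.pyGetD flat k 0) false).map (fun i => PySem.List.pyGetD items i 0)
        = ((PySem.List.sorted (PySem.List.pyRange 0 (flat.length : Int) 1)
            (fun k => (f k).1) false).map f).map (fun p => p.2) := by
          rw [List.map_map]; rfl
      _ = (PySem.List.sorted pairs (fun p => p.1) false).map (fun p => p.2) := by rw [h1]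
  rw [hA]
  -- B's side: the bucket dict
  have hfold : (PySem.List.enumerate flat 0).foldl
        (fun d kv => d.modify kv.2 [] (fun b => b ++ [PySem.List.pyGetD items kv.1 0]))
        PySem.Dict.empty
      = pairs.foldl (fun d p => d.modify p.1 [] (fun b => b ++ [p.2])) PySem.Dict.empty := by
    rw [hpairs, List.foldl_map]
  rw [hfold]
  set buckets := pairs.foldl (fun d p => d.modify p.1 [] (fun b => b ++ [p.2])) PySem.Dict.empty
    with hbuckets
  have hgetD : ∀ v, buckets.getD v [] = (pairs.filter (fun p => p.1 == v)).map (fun p => p.2) := by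
    intro v
    rw [hbuckets, PySem.Dict.getD_foldl_modify_append]
    simp
  have hkeys : buckets.keys = PySem.Set.ofList (pairs.map (fun p => p.1)) := by
    rw [hbuckets, PySem.Dict.keys_foldl_modify_key]
    simp [PySem.Set.update_eq_append_filter]
  rw [hkeys]
  set ks := PySem.List.sorted (PySem.Set.ofList (pairs.map (fun p => p.1))) (fun v => v) false
    with hks
  have hsorted : ks.Pairwise (· < ·) := by
    rw [hks]; exact PySem.List.sorted_ofList_pairwise_lt _
  have hcover : ∀ p ∈ pairs, p.1 ∈ ks := by
    intro p hp
    rw [hks, PySem.List.mem_sorted, PySem.Set.mem_ofList]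
    exact List.mem_map_of_mem hp
  have hout : ks.foldl (fun out v => out ++ buckets.getD v []) []
      = ks.flatMap (fun v => buckets.getD v []) := by
    rw [PySem.List.foldl_append_eq_flatMap]; simp
  rw [hout]
  have hbmap : ks.flatMap (fun v => buckets.getD v [])
      = (ks.flatMap (fun v => pairs.filter (fun p => p.1 == v))).map (fun p => p.2) := by
    rw [List.map_flatMap]
    exact List.flatMap_congr (fun v _ => hgetD v)
  rw [hbmap, ← sorted_eq_flatMap pairs ks hsorted hcover]
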